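-- pv_equiv track=rewrite | github.com/erogier/bankdeposit_FRA | qard_bulk_download.py | pick_files
-- ===== SOURCE A (Python) =====
-- from typing import List, Dict, Tuple, Optional
--
-- ALLOWED_DATATYPES = {
--     "ACT",
--     "ARTICLES_OF_ASSOCIATION",
--     "LEGAL_NOTICE",
--     "AVIS_SIREN",
-- }
--
-- def pick_files(files: List[Dict], download_all: bool, max_files_per_user: int) -> List[Tuple[str, str]]:
--     """
--     Returns a list of (file_id, datatype) tuples to download.
--     If download_all=False, returns at most one file.
--     """
--     chosen = []
--     for f in files:
--         dtype = (f.get("datatype") or f.get("data_type") or "").upper()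
--         if ALLOWED_DATATYPES and dtype and dtype not in ALLOWED_DATATYPES:
--             continue
--         fid = f.get("id") or f.get("file_id") or f.get("uuid")
--         if not fid:
--             continue
--         chosen.append((fid, dtype or "UNKNOWN"))
--         if not download_all and chosen:
--             break
--         if download_all and len(chosen) >= max_files_per_user:
--             break
--     return chosen
-- ===== SOURCE B (Python) =====
-- from typing import List, Dict, Tuple, Optional
--
-- ALLOWED_DATATYPES = {
--     "ACT",
--     "ARTICLES_OF_ASSOCIATION",
--     "LEGAL_NOTICE",
--     "AVIS_SIREN",
-- }
--
-- def _select(f):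
--     """(file_id, datatype) if the file passes the filter, else None."""
--     dtype = (f.get("datatype") or f.get("data_type") or "").upper()
--     fid = f.get("id") or f.get("file_id") or f.get("uuid")
--     if fid and (not dtype or dtype in ALLOWED_DATATYPES):
--         return (fid, dtype or "UNKNOWN")
--     return None
--
-- def pick_files(files: List[Dict], download_all: bool, max_files_per_user: int) -> List[Tuple[str, str]]:
--     # limit policy separated from the filter: at most one file unless download_all;
--     # max(1, ...) because the original appends before checking the limit.
--     limit = max(1, max_files_per_user) if download_all else 1
--     return [t for t in map(_select, files) if t is not None][:limit]
-- ===== Notes on version B (the rewrite author's own statement) =====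
-- stated objective: simpler
-- what changed: Replaces the single loop with append-then-break bookkeeping by a filter (map a per-file selector, drop Nones) followed by one slice [:limit], where limit = max(1, max_files_per_user) if download_all else 1 is computed up front; the two break branches disappear.
import Mathlib
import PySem

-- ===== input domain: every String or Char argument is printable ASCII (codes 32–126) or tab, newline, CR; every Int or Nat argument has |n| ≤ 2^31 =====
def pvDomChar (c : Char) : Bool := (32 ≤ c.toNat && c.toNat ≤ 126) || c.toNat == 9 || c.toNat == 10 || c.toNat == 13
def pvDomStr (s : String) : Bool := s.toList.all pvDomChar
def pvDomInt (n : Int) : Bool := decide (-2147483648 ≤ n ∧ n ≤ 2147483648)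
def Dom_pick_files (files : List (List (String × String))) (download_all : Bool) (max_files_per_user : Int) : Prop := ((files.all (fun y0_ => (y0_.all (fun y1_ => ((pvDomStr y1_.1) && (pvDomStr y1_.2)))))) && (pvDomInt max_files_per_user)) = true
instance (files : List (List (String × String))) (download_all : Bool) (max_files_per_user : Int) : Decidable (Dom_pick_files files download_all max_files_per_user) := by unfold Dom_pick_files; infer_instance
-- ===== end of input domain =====

-- B replaces the loop with append-then-break bookkeeping by filter + one slice with an
-- up-front limit (simpler decomposition; same cost). Equivalence is on the return value.

-- shared Python-semantics shims: `x or y` for Option String / String operands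
def pyOrO (a b : Option String) : Option String :=
  match a with
  | some s => if s = "" then b else some s
  | none => b

def pyOrS (a : Option String) (d : String) : String :=
  match a with
  | some s => if s = "" then d else s
  | none => d

def allowedDatatypes : List String :=
  ["ACT", "ARTICLES_OF_ASSOCIATION", "LEGAL_NOTICE", "AVIS_SIREN"]

-- ===== PORT A =====
-- the for-loop with its two break branches, as structural recursion over the files
def pickLoop (download_all : Bool) (max_files_per_user : Int) :
    List (List (String × String)) → List (String × String) → List (String × String)
  | [], chosen => chosen
  | f :: rest, chosen =>
    let d := PySem.Dict.ofList f
    let dtype := PySem.Str.upper (pyOrS (pyOrO (d.get? "datatype") (d.get? "data_type")) "")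
    if dtype ≠ "" ∧ dtype ∉ allowedDatatypes then
      pickLoop download_all max_files_per_user rest chosen
    else
      let fid := pyOrS (pyOrO (d.get? "id") (pyOrO (d.get? "file_id") (d.get? "uuid"))) ""
      if fid = "" then
        pickLoop download_all max_files_per_user rest chosen
      else
        let chosen' := chosen ++ [(fid, if dtype = "" then "UNKNOWN" else dtype)]
        if ¬download_all ∧ chosen' ≠ [] then chosen'
        else if download_all ∧ (chosen'.length : Int) ≥ max_files_per_user then chosen'
        else pickLoop download_all max_files_per_user rest chosen'

def pick_files (files : List (List (String × String))) (download_all : Bool) (max_files_per_user : Int) : List (String × String) :=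
  pickLoop download_all max_files_per_user files []

-- ===== PORT B =====
-- per-file selector (Source B's _select)
def selectFile (f : List (String × String)) : Option (String × String) :=
  let d := PySem.Dict.ofList f
  let dtype := PySem.Str.upper (pyOrS (pyOrO (d.get? "datatype") (d.get? "data_type")) "")
  let fid := pyOrS (pyOrO (d.get? "id") (pyOrO (d.get? "file_id") (d.get? "uuid"))) ""
  if fid ≠ "" ∧ (dtype = "" ∨ dtype ∈ allowedDatatypes) then
    some (fid, if dtype = "" then "UNKNOWN" else dtype)
  else
    none

def pick_files_alt (files : List (List (String × String))) (download_all : Bool) (max_files_per_user : Int) : List (String × String) :=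
  let limit : Int := if download_all then max 1 max_files_per_user else 1
  (files.filterMap selectFile).take limit.toNat

-- ===== PRECONDITION & SPEC =====
def Spec_pick_files (files : List (List (String × String))) (download_all : Bool) (max_files_per_user : Int) (out : List (String × String)) : Prop := out = pick_files_alt files download_all max_files_per_user
instance (files : List (List (String × String))) (download_all : Bool) (max_files_per_user : Int) (out : List (String × String)) : Decidable (Spec_pick_files files download_all max_files_per_user out) := by unfold Spec_pick_files; infer_instance

-- ===== CLAIM (what is proved, stated in full; the proofs are below) =====
def Claim_equal_pick_files : Prop := ∀ (files : List (List (String × String))) (download_all : Bool) (max_files_per_user : Int), Dom_pick_files files download_all max_files_per_user → Spec_pick_files files download_all max_files_per_user (pick_files files download_all max_files_per_user)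

-- ===== LEMMAS AND PROOFS =====

-- the loop, started with any partial `chosen` still below the limit, extends it by
-- the next (limit - |chosen|) selected files
theorem pickLoop_eq (download_all : Bool) (max_files_per_user : Int)
    (limit : Int) (hlim : limit = if download_all then max 1 max_files_per_user else 1) :
    ∀ (files : List (List (String × String))) (chosen : List (String × String)),
      (chosen.length : Int) < limit →
      pickLoop download_all max_files_per_user files chosen =
        chosen ++ (files.filterMap selectFile).take (limit - chosen.length).toNat := by
  intro files
  induction files with
  | nil => intro chosen h; simp [pickLoop]
  | cons f rest ih =>
    intro chosen h
    have hlim1 : 1 ≤ limit := by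
      rcases download_all with _ | _ <;> simp [hlim]
    simp only [pickLoop, selectFile, List.filterMap_cons]
    set d := PySem.Dict.ofList f with hd
    set dtype := PySem.Str.upper (pyOrS (pyOrO (d.get? "datatype") (d.get? "data_type")) "") with hdt
    set fid := pyOrS (pyOrO (d.get? "id") (pyOrO (d.get? "file_id") (d.get? "uuid"))) "" with hfid
    by_cases hskip : dtype ≠ "" ∧ dtype ∉ allowedDatatypes
    · -- datatype filtered out: selector yields none, loop continues
      have hsel : ¬(fid ≠ "" ∧ (dtype = "" ∨ dtype ∈ allowedDatatypes)) := by tauto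
      rw [if_pos hskip, if_neg hsel]
      exact ih chosen h
    · rw [if_neg hskip]
      by_cases hfid0 : fid = ""
      · have hsel : ¬(fid ≠ "" ∧ (dtype = "" ∨ dtype ∈ allowedDatatypes)) := by tauto
        rw [if_pos hfid0, if_neg hsel]
        exact ih chosen h
      · have hsel : fid ≠ "" ∧ (dtype = "" ∨ dtype ∈ allowedDatatypes) := by tauto
        rw [if_neg hfid0, if_pos hsel]
        set x : String × String := (fid, if dtype = "" then "UNKNOWN" else dtype) with hx
        rcases download_all with _ | _
        · -- not download_all: always break after the append; limit = 1, chosen = []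
          have hc0 : chosen = [] := by
            have : (chosen.length : Int) < 1 := by rw [hlim] at h; simpa using h
            have : chosen.length = 0 := by omega
            simpa [List.length_eq_zero_iff] using this
          rw [if_pos (by simp)]
          have : (limit - (chosen.length : Int)).toNat = 1 := by
            subst hc0; simp [hlim]
          rw [this]
          simp [hc0]
        · -- download_all
          rw [if_neg (by simp)]
          simp only [true_and]
          have hlen' : ((chosen ++ [x]).length : Int) = (chosen.length : Int) + 1 := by
            simp
          by_cases hbrk : ((chosen ++ [x]).length : Int) ≥ max_files_per_user
          · -- break: the appended element is exactly the last one taken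
            rw [if_pos hbrk]
            have hmax : limit = max 1 max_files_per_user := by simpa using hlim
            have h1 : (limit - (chosen.length : Int)).toNat = 1 := by
              rw [hmax]; rw [hmax] at h; omega
            rw [h1]
            simp
          · rw [if_neg hbrk]
            have hmax : limit = max 1 max_files_per_user := by simpa using hlim
            have hlt : ((chosen ++ [x]).length : Int) < limit := by
              rw [hmax]; rw [hlen']; omega
            rw [ih (chosen ++ [x]) hlt]
            have hgap : (limit - (chosen.length : Int)).toNat
                = ((limit - ((chosen ++ [x]).length : Int)).toNat) + 1 := by
              rw [hlen']; omega
            rw [hgap]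
            rw [List.take_succ_cons]
            simp only [List.append_assoc, List.cons_append, List.nil_append]
            rfl

-- ===== VERDICT (by name: the statement is the Claim_ definition above) =====
theorem pick_files_spec : Claim_equal_pick_files := by
  intro files download_all max_files_per_user _
  unfold Spec_pick_files pick_files pick_files_alt
  set limit : Int := if download_all then max 1 max_files_per_user else 1 with hlim
  have hpos : (([] : List (String × String)).length : Int) < limit := by
    rcases download_all with _ | _ <;> simp [hlim]
  rw [pickLoop_eq download_all max_files_per_user limit hlim files [] hpos]
  simp
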